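-- pv_equiv track=rewrite | github.com/DataFacil/Ejercicios-intermedios-de-Python | Contador de Repetidos.py | lista_de_tuplas
-- ===== SOURCE A (Python) =====
-- def lista_de_tuplas(lista):
--     if type(lista) != list:
--         return None
--
--     else:
--         contador = {}
--         for elem in lista:
--             if elem in contador:
--                 contador[elem] += 1
--             else:
--                 contador[elem] = 1
--
--         respuesta = list(contador.items())
--         return respuesta
-- ===== SOURCE B (Python) =====
-- def lista_de_tuplas(lista):
--     if type(lista) != list:
--         return None
--     return [(e, lista.count(e)) for e in dict.fromkeys(lista)]
-- ===== Notes on version B (the rewrite author's own statement) =====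
-- stated objective: simpler
-- what changed: Replaces the incremental counter-dict loop with an ordered dedup (dict.fromkeys) followed by a count scan per unique element.
import Mathlib
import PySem

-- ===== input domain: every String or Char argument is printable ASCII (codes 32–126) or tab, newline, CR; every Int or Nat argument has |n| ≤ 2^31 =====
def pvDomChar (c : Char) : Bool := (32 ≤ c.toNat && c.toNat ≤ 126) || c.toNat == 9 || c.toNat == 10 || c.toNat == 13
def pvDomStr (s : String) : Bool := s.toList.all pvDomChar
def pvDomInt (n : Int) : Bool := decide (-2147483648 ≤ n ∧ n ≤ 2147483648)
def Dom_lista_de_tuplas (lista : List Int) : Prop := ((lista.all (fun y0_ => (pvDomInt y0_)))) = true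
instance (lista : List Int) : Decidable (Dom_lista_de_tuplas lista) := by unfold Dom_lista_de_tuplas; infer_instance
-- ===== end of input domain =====

-- B replaces A's incremental counter-dict loop with an ordered dedup followed by a per-element count (simpler decomposition, not faster).


-- ===== PORT A =====
-- Python's `type(lista) != list` guard never fires here: the argument is typed List Int.
def lista_de_tuplas (lista : List Int) : List (Int × Int) :=
  let contador := lista.foldl
    (fun contador elem =>
      if contador.contains elem then contador.insert elem (contador.getD elem 0 + 1)
      else contador.insert elem 1)
    (PySem.Dict.empty : PySem.Dict Int Int)
  contador.items

-- ===== PORT B =====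
def lista_de_tuplas_alt (lista : List Int) : List (Int × Int) :=
  (PySem.List.dedup lista).map (fun e => (e, (lista.count e : Int)))

-- ===== PRECONDITION & SPEC =====
def Spec_lista_de_tuplas (lista : List Int) (out : List (Int × Int)) : Prop := out = lista_de_tuplas_alt lista
instance (lista : List Int) (out : List (Int × Int)) : Decidable (Spec_lista_de_tuplas lista out) := by unfold Spec_lista_de_tuplas; infer_instance

-- ===== CLAIM (what is proved, stated in full; the proofs are below) =====
def Claim_equal_lista_de_tuplas : Prop := ∀ (lista : List Int), Dom_lista_de_tuplas lista → Spec_lista_de_tuplas lista (lista_de_tuplas lista)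

-- ===== LEMMAS AND PROOFS =====
-- A's loop body equals the canonical counter step: when the key is absent, getD is 0.
theorem lista_de_tuplas_step_eq (d : PySem.Dict Int Int) (x : Int) :
    (if d.contains x then d.insert x (d.getD x 0 + 1) else d.insert x 1)
      = d.insert x (d.getD x 0 + 1) := by
  by_cases h : d.contains x = true
  · simp [h]
  · have hn : d.get? x = none := by
      have := PySem.Dict.contains_eq_isSome_get? d x
      cases hg : d.get? x with
      | none => rfl
      | some v => rw [hg] at this; simp at this; exact absurd this h
    simp [h, PySem.Dict.getD, hn]

-- ===== VERDICT (by name: the statement is the Claim_ definition above) =====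
theorem lista_de_tuplas_spec : Claim_equal_lista_de_tuplas := by
  intro lista _
  unfold Spec_lista_de_tuplas lista_de_tuplas lista_de_tuplas_alt
  have hstep : (fun (d : PySem.Dict Int Int) (x : Int) =>
      if d.contains x then d.insert x (d.getD x 0 + 1) else d.insert x 1)
      = fun d x => d.insert x (d.getD x 0 + 1) := by
    funext d x; exact lista_de_tuplas_step_eq d x
  simp only [hstep, PySem.Dict.foldl_insert_getD_add_one_eq_counter,
    PySem.Dict.items_counter, PySem.List.dedup_eq_ofList]
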